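-- pv_equiv track=rewrite | github.com/jano31415/codejam | codeforces/787_round_div3/probd.py | solve
-- ===== SOURCE A (Python) =====
-- def solve(n, neigh, root):
--     # dfs
--     stack = [root]
--     res=[]
--     q=[]
--     while len(stack) >0:
--         curr = stack.pop()
--         q.append(curr)
--         children = neigh.get(curr, [])
--         if len(children) == 0:
--             res.append(q)
--             q=[]
--         for c in children:
--             stack.append(c)
--     return res
-- ===== SOURCE B (Python) =====
-- def solve(n, neigh, root):
--     # Stage 1: build the flat preorder sequence (children explored in LIFO order,
--     # like A's stack), without any grouping.
--     order = []
--     pending = [root]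
--     while pending:
--         u = pending[0]
--         order.append(u)
--         pending = list(reversed(neigh.get(u, []))) + pending[1:]
--     # Stage 2: cut the preorder after every leaf; a trailing non-leaf segment
--     # cannot occur (the walk always ends at a leaf).
--     res = []
--     q = []
--     for u in order:
--         q.append(u)
--         if not neigh.get(u, []):
--             res.append(q)
--             q = []
--     return res
-- ===== Notes on version B (the rewrite author's own statement) =====
-- stated objective: alternative
-- what changed: A's single stack loop that groups on the fly is split into two staged passes: first build the flat preorder sequence of the tree, then a separate pass cuts that sequence into groups after every leaf.
import Mathlib
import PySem

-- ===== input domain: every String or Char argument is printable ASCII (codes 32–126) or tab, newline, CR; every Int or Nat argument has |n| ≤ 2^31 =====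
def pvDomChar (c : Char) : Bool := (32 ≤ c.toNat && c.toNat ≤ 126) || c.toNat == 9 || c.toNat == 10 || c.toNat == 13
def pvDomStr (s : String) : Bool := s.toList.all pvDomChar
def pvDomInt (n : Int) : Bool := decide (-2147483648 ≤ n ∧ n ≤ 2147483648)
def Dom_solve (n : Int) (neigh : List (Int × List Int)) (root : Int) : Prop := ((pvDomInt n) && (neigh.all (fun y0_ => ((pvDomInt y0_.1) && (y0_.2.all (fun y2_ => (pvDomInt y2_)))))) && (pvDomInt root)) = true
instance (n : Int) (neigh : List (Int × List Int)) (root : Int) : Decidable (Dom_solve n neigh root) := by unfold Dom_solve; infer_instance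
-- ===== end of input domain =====

-- B replaces A's single stack loop (which groups on the fly) by two staged passes:
-- first the flat preorder sequence, then a grouping pass that cuts it after every leaf.

-- Fuel for both ports: the Python loops are unbounded; this bound is a totality device only
-- (one unit per visited node in both ports).
def pvFuel (neigh : List (Int × List Int)) : Nat :=
  (neigh.foldl (fun m p => max m p.2.length) 0 + 1) ^ (neigh.length + 1)

-- ===== PORT A =====
-- A's while loop; the Python stack is modelled with its TOP AT THE HEAD:
-- 'stack.pop()' = take the head, 'for c in children: stack.append(c)' = children.reverse ++ rest.
def loopA (d : PySem.Dict Int (List Int)) : Nat → List Int → List Int → List (List Int) → List (List Int)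
  | 0, _, _, res => res
  | _ + 1, [], _, res => res
  | f + 1, curr :: rest, q, res =>
    let q' := q ++ [curr]
    let children := d.getD curr []
    if children.isEmpty then loopA d f rest [] (res ++ [q'])
    else loopA d f (children.reverse ++ rest) q' res

def solve (n : Int) (neigh : List (Int × List Int)) (root : Int) : List (List Int) :=
  loopA (PySem.Dict.ofList neigh) (pvFuel neigh) [root] [] []

-- ===== PORT B =====
-- Stage 1 of Source B: the flat preorder; 'pending[0]' is the head, the new pending is
-- list(reversed(children)) ++ pending[1:].
def preB (d : PySem.Dict Int (List Int)) : Nat → List Int → List Int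
  | 0, _ => []
  | _ + 1, [] => []
  | f + 1, u :: rest => u :: preB d f ((d.getD u []).reverse ++ rest)

-- Stage 2 of Source B: cut the order list after every leaf (trailing q is discarded).
def groupB (d : PySem.Dict Int (List Int)) : List Int → List Int → List (List Int)
  | _, [] => []
  | q, u :: t =>
    if (d.getD u []).isEmpty then (q ++ [u]) :: groupB d [] t
    else groupB d (q ++ [u]) t

def solve_alt (n : Int) (neigh : List (Int × List Int)) (root : Int) : List (List Int) :=
  let d := PySem.Dict.ofList neigh
  groupB d [] (preB d (pvFuel neigh) [root])

-- ===== PRECONDITION & SPEC =====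
def Spec_solve (n : Int) (neigh : List (Int × List Int)) (root : Int) (out : List (List Int)) : Prop := out = solve_alt n neigh root
instance (n : Int) (neigh : List (Int × List Int)) (root : Int) (out : List (List Int)) : Decidable (Spec_solve n neigh root out) := by unfold Spec_solve; infer_instance

-- ===== CLAIM (what is proved, stated in full; the proofs are below) =====
def Claim_equal_solve : Prop := ∀ (n : Int) (neigh : List (Int × List Int)) (root : Int), Dom_solve n neigh root → Spec_solve n neigh root (solve n neigh root)

-- ===== LEMMAS AND PROOFS =====

-- A's loop is B's grouping pass applied to B's preorder (same fuel accounting on both sides).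
theorem loopA_eq_group_pre (d : PySem.Dict Int (List Int)) :
    ∀ fu s q res, loopA d fu s q res = res ++ groupB d q (preB d fu s) := by
  intro fu
  induction fu with
  | zero => intro s q res; simp [loopA, preB, groupB]
  | succ fu ih =>
    intro s q res
    match s with
    | [] => simp [loopA, preB, groupB]
    | a :: t =>
      rw [loopA, preB]
      by_cases hc : (d.getD a []).isEmpty
      · have hnil : (d.getD a []) = [] := List.isEmpty_iff.mp hc
        rw [if_pos hc, ih, groupB, if_pos hc, hnil]
        simp
      · rw [if_neg hc, ih, groupB, if_neg hc]

-- ===== VERDICT (by name: the statement is the Claim_ definition above) =====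
theorem solve_spec : Claim_equal_solve := by
  intro n neigh root _
  unfold Spec_solve solve solve_alt
  exact loopA_eq_group_pre (PySem.Dict.ofList neigh) (pvFuel neigh) [root] [] []
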